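-- pv_equiv track=rewrite | github.com/cr33p0k/luggify | server/main.py | _cached_attractions_need_google_refresh
-- ===== SOURCE A (Python) =====
-- def _is_google_attraction_image(image_url: str | None) -> bool:
--     image = str(image_url or "").strip().lower()
--     return (
--         "googleusercontent.com/place-photos/" in image
--         or "googleusercontent.com/places/" in image
--     )
--
-- def _is_google_place_photo(image_url: str | None) -> bool:
--     return _is_google_attraction_image(image_url)
--
-- def _cached_attractions_need_google_refresh(attractions: list[dict]) -> bool:
--     if not attractions:
--         return True
--
--     has_google_photo = False
--     for attraction in attractions:
--         image = str((attraction or {}).get("image") or "").strip()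
--         if not image:
--             return True
--         if _is_google_place_photo(image):
--             has_google_photo = True
--
--     return not has_google_photo
-- ===== SOURCE B (Python) =====
-- def _is_google_attraction_image(image_url):
--     image = str(image_url or "").strip().lower()
--     return (
--         "googleusercontent.com/place-photos/" in image
--         or "googleusercontent.com/places/" in image
--     )
--
-- def _is_google_place_photo(image_url):
--     return _is_google_attraction_image(image_url)
--
-- def _cached_attractions_need_google_refresh(attractions):
--     images = [str((a or {}).get("image") or "").strip() for a in attractions]
--     return not all(images) or not any(_is_google_place_photo(i) for i in images)
-- ===== Notes on version B (the rewrite author's own statement) =====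
-- stated objective: idiomatic
-- what changed: Replaces A's single early-exit loop with a running has_google_photo flag (and a separate empty-list guard) by one normalization pass building the list of stripped image strings followed by two declarative aggregations, not all(images) or not any(google photo), which also subsumes the empty-list case.
import Mathlib
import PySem

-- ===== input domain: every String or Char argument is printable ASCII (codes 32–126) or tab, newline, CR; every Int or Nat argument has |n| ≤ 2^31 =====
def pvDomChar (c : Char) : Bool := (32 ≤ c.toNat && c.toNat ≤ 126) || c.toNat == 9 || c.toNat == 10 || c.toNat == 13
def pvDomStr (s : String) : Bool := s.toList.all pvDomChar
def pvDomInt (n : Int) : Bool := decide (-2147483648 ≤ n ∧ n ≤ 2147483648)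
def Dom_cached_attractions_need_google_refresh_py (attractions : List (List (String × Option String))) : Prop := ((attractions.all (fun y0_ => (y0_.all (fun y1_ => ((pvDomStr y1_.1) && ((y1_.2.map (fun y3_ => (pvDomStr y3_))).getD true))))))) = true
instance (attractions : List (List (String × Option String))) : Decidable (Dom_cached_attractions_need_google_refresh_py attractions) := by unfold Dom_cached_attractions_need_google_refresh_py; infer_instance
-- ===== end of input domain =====

-- B replaces A's early-exit loop with a running flag by one normalization pass plus two
-- declarative aggregations (all non-empty / any google photo); idiomatic, same cost.

-- ===== PORT A =====
-- image = str(image_url or "").strip().lower(); substring tests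
def pv_is_google_attraction_image (image_url : Option String) : Bool :=
  let image := PySem.Str.lower (PySem.Str.strip (image_url.getD ""))
  PySem.Str.isIn "googleusercontent.com/place-photos/" image
    || PySem.Str.isIn "googleusercontent.com/places/" image

def pv_is_google_place_photo (image_url : Option String) : Bool :=
  pv_is_google_attraction_image image_url

-- the for-loop of A, carrying the has_google_photo flag; early return on empty image
def pvALoop : List (List (String × Option String)) → Bool → Bool
  | [], has_google_photo => !has_google_photo
  | attraction :: rest, has_google_photo =>
    let image := PySem.Str.strip ((((PySem.Dict.mk attraction).get? "image").getD none).getD "")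
    if image = "" then true
    else pvALoop rest (has_google_photo || pv_is_google_place_photo (some image))

def cached_attractions_need_google_refresh_py (attractions : List (List (String × Option String))) : Bool :=
  if attractions = [] then true
  else pvALoop attractions false

-- ===== PORT B =====
-- str((a or {}).get("image") or "").strip()
def pvNormImage (a : List (String × Option String)) : String :=
  PySem.Str.strip ((((PySem.Dict.mk a).get? "image").getD none).getD "")

def cached_attractions_need_google_refresh_py_alt (attractions : List (List (String × Option String))) : Bool :=
  let images := attractions.map pvNormImage
  !(images.all (fun i => !(i == ""))) || !(images.any (fun i => pv_is_google_place_photo (some i)))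

-- ===== PRECONDITION & SPEC =====
def Spec_cached_attractions_need_google_refresh_py (attractions : List (List (String × Option String))) (out : Bool) : Prop := out = cached_attractions_need_google_refresh_py_alt attractions
instance (attractions : List (List (String × Option String))) (out : Bool) : Decidable (Spec_cached_attractions_need_google_refresh_py attractions out) := by unfold Spec_cached_attractions_need_google_refresh_py; infer_instance

-- ===== CLAIM (what is proved, stated in full; the proofs are below) =====
def Claim_equal_cached_attractions_need_google_refresh_py : Prop := ∀ (attractions : List (List (String × Option String))), Dom_cached_attractions_need_google_refresh_py attractions → Spec_cached_attractions_need_google_refresh_py attractions (cached_attractions_need_google_refresh_py attractions)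

-- ===== LEMMAS AND PROOFS =====
-- loop invariant: A's loop equals B's two aggregations over the remaining suffix,
-- with the flag folded into the 'any' side
theorem pvALoop_eq (xs : List (List (String × Option String))) (has : Bool) :
    pvALoop xs has
      = (!((xs.map pvNormImage).all (fun i => !(i == "")))
         || !(has || (xs.map pvNormImage).any (fun i => pv_is_google_place_photo (some i)))) := by
  induction xs generalizing has with
  | nil => simp [pvALoop]
  | cons d rest ih =>
    simp only [pvALoop, List.map_cons, List.all_cons, List.any_cons]
    by_cases h : pvNormImage d = ""
    · simp [pvNormImage] at h ⊢
      simp [h]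
    · simp only [pvNormImage] at h ⊢
      rw [if_neg h, ih]
      have : (PySem.Str.strip ((((PySem.Dict.mk d).get? "image").getD none).getD "") == "") = false := by
        simpa using h
      simp [this, Bool.or_assoc]

theorem cached_attractions_need_google_refresh_py_spec : Claim_equal_cached_attractions_need_google_refresh_py := by
  intro attractions _
  unfold Spec_cached_attractions_need_google_refresh_py cached_attractions_need_google_refresh_py
    cached_attractions_need_google_refresh_py_alt
  by_cases h : attractions = []
  · subst h; simp
  · rw [if_neg h, pvALoop_eq]
    simp
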